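-- pv_equiv track=rewrite | github.com/miciav/nanofaas | scripts/lib/loadtest_registry_config.py | build_test_matrix
-- ===== SOURCE A (Python) =====
-- WORKLOAD_ORDER = ["word-stats", "json-transform"]
--
-- RUNTIME_ORDER = ["java", "java-lite", "python", "exec"]
--
-- def _normalize_csv(values: list[str]) -> list[str]:
--     normalized: list[str] = []
--     seen: set[str] = set()
--     for raw in values:
--         item = raw.strip().lower()
--         if not item or item in seen:
--             continue
--         seen.add(item)
--         normalized.append(item)
--     return normalized
--
-- def build_test_matrix(workloads: list[str], runtimes: list[str]) -> list[str]:
--     selected_workloads = _normalize_csv(workloads)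
--     selected_runtimes = _normalize_csv(runtimes)
--
--     unknown_workloads = [w for w in selected_workloads if w not in WORKLOAD_ORDER]
--     if unknown_workloads:
--         raise ValueError(f"unknown workloads: {', '.join(unknown_workloads)}")
--     unknown_runtimes = [r for r in selected_runtimes if r not in RUNTIME_ORDER]
--     if unknown_runtimes:
--         raise ValueError(f"unknown runtimes: {', '.join(unknown_runtimes)}")
--
--     ordered_workloads = [w for w in WORKLOAD_ORDER if w in selected_workloads]
--     ordered_runtimes = [r for r in RUNTIME_ORDER if r in selected_runtimes]
--     return [f"{workload}-{runtime}" for workload in ordered_workloads for runtime in ordered_runtimes]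
-- ===== SOURCE B (Python) =====
-- WORKLOAD_ORDER = ["word-stats", "json-transform"]
--
-- RUNTIME_ORDER = ["java", "java-lite", "python", "exec"]
--
-- def _mask(values, order, label):
--     mask = 0
--     unknown = []
--     for raw in values:
--         item = raw.strip().lower()
--         if not item:
--             continue
--         try:
--             mask |= 1 << order.index(item)
--         except ValueError:
--             if item not in unknown:
--                 unknown.append(item)
--     if unknown:
--         raise ValueError(f"unknown {label}: {', '.join(unknown)}")
--     return mask
--
-- def build_test_matrix(workloads, runtimes):
--     wm = _mask(workloads, WORKLOAD_ORDER, "workloads")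
--     rm = _mask(runtimes, RUNTIME_ORDER, "runtimes")
--     out = []
--     for i, w in enumerate(WORKLOAD_ORDER):
--         if wm >> i & 1:
--             for j, r in enumerate(RUNTIME_ORDER):
--                 if rm >> j & 1:
--                     out.append(f"{w}-{r}")
--     return out
-- ===== Notes on version B (the rewrite author's own statement) =====
-- stated objective: alternative
-- what changed: B never builds normalized/ordered selection lists: a single pass folds each input into an integer bitmask keyed by the item's rank in the constant order table (collecting unknowns for the same ValueError), and the output is produced by decoding the two masks bit by bit over the enumerated constant tables.
import Mathlib
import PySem

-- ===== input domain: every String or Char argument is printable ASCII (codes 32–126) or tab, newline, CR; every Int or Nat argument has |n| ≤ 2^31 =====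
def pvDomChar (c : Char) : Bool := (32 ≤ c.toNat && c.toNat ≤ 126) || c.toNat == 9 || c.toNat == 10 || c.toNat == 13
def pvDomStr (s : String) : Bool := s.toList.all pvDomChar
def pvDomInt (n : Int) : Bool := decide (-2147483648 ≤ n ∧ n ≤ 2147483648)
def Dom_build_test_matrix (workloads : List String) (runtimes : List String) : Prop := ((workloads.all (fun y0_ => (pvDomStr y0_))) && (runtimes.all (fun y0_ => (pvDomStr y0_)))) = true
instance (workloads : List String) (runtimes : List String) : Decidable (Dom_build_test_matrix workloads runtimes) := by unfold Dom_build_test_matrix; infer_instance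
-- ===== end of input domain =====

-- B represents the selections as integer bitmasks (one bit per canonical name, set while
-- scanning the raw input once, no dedup list or ordered selection list is ever built) and
-- emits the product by decoding the two masks over the enumerated constant tables
-- ('alternative'; same asymptotic cost).
-- Pre_ excludes exactly the inputs on which A raises ValueError (an unknown workload/runtime); B raises there too.

-- ===== PORT A =====
def WORKLOAD_ORDER : List String := ["word-stats", "json-transform"]
def RUNTIME_ORDER : List String := ["java", "java-lite", "python", "exec"]

def pvClean (raw : String) : String := PySem.Str.lower (PySem.Str.strip raw)

-- _normalize_csv: loop with an output list and a 'seen' set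
def normalize_csv (values : List String) : List String :=
  (values.foldl
    (fun (st : List String × PySem.Set String) raw =>
      if pvClean raw = "" ∨ st.2.contains (pvClean raw) then st
      else (st.1 ++ [pvClean raw], st.2.add (pvClean raw)))
    ([], PySem.Set.empty)).1

def build_test_matrix (workloads : List String) (runtimes : List String) : List String :=
  let selected_workloads := normalize_csv workloads
  let selected_runtimes := normalize_csv runtimes
  let unknown_workloads := selected_workloads.filter (fun w => !(WORKLOAD_ORDER.contains w))
  if unknown_workloads ≠ [] then []   -- Python raises ValueError here; outside Pre_
  else
    let unknown_runtimes := selected_runtimes.filter (fun r => !(RUNTIME_ORDER.contains r))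
    if unknown_runtimes ≠ [] then []  -- Python raises ValueError here; outside Pre_
    else
      let ordered_workloads := WORKLOAD_ORDER.filter (fun w => selected_workloads.contains w)
      let ordered_runtimes := RUNTIME_ORDER.filter (fun r => selected_runtimes.contains r)
      ordered_workloads.flatMap (fun w => ordered_runtimes.map (fun r => w ++ "-" ++ r))

-- ===== PORT B =====
-- _mask's loop body: set the bit of the item's rank, or record an unknown item
def pvMaskStep (order : List String) (st : Nat × List String) (raw : String) : Nat × List String :=
  let item := pvClean raw
  if item = "" then st
  else
    match PySem.List.index? order item with
    | some i => (st.1 ||| (1 <<< i), st.2)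
    | none => if st.2.contains item then st else (st.1, st.2 ++ [item])

-- _mask: one pass accumulating (mask, unknown); none = Python's ValueError (outside Pre_)
def pvMask (values : List String) (order : List String) : Option Nat :=
  let st := values.foldl (pvMaskStep order) (0, [])
  if st.2 ≠ [] then none else some st.1

def build_test_matrix_alt (workloads : List String) (runtimes : List String) : List String :=
  match pvMask workloads WORKLOAD_ORDER with
  | none => []  -- Python raises ValueError here; outside Pre_
  | some wm =>
    match pvMask runtimes RUNTIME_ORDER with
    | none => []  -- Python raises ValueError here; outside Pre_
    | some rm =>
      (PySem.List.enumerate WORKLOAD_ORDER).foldl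
        (fun out iw =>
          if (wm >>> iw.1.toNat) &&& 1 ≠ 0 then
            (PySem.List.enumerate RUNTIME_ORDER).foldl
              (fun out2 jr =>
                if (rm >>> jr.1.toNat) &&& 1 ≠ 0 then out2 ++ [iw.2 ++ "-" ++ jr.2] else out2)
              out
          else out)
        []

-- ===== PRECONDITION & SPEC =====
-- Pre_: every entry, stripped and lowercased, is empty or a known name — exactly the inputs
-- on which A returns instead of raising ValueError.
def Pre_build_test_matrix (workloads : List String) (runtimes : List String) : Prop :=
  (∀ x ∈ workloads, pvClean x = "" ∨ pvClean x ∈ WORKLOAD_ORDER) ∧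
  (∀ x ∈ runtimes, pvClean x = "" ∨ pvClean x ∈ RUNTIME_ORDER)
instance (workloads : List String) (runtimes : List String) : Decidable (Pre_build_test_matrix workloads runtimes) := by unfold Pre_build_test_matrix; infer_instance

def pvWitness_build_test_matrix : List String × List String :=
  (["Word-Stats", " json-transform", ""], ["java", "EXEC", "java"])

def Spec_build_test_matrix (workloads : List String) (runtimes : List String) (out : List String) : Prop := out = build_test_matrix_alt workloads runtimes
instance (workloads : List String) (runtimes : List String) (out : List String) : Decidable (Spec_build_test_matrix workloads runtimes out) := by unfold Spec_build_test_matrix; infer_instance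

-- ===== CLAIM (what is proved, stated in full; the proofs are below) =====
def Claim_equal_build_test_matrix : Prop := ∀ (workloads : List String) (runtimes : List String), Dom_build_test_matrix workloads runtimes → Pre_build_test_matrix workloads runtimes → Spec_build_test_matrix workloads runtimes (build_test_matrix workloads runtimes)

-- ===== LEMMAS AND PROOFS =====

-- 'name w occurs among the cleaned entries of vs' — the one boolean both programs reduce to
def appears (vs : List String) (w : String) : Bool := vs.any (fun x => pvClean x == w)

-- the pure value of B's mask accumulator
def pvPure (order : List String) : List String → Nat
  | [] => 0
  | x :: xs =>
    (if pvClean x = "" then 0 else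
      match PySem.List.index? order (pvClean x) with
      | some i => 1 <<< i
      | none => 0) ||| pvPure order xs

-- A's (output list, seen set) loop keeps both components equal as lists, so it computes the
-- ordered dedup of the cleaned, empties-dropped input.
theorem normalize_loop (values : List String) (s : PySem.Set String) :
    values.foldl
      (fun (st : List String × PySem.Set String) raw =>
        if pvClean raw = "" ∨ st.2.contains (pvClean raw) then st
        else (st.1 ++ [pvClean raw], st.2.add (pvClean raw)))
      (s, s)
    = (PySem.Set.update s ((values.map pvClean).filter (fun v => !(v == ""))),
       PySem.Set.update s ((values.map pvClean).filter (fun v => !(v == "")))) := by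
  induction values generalizing s with
  | nil => simp [PySem.Set.update]
  | cons x xs ih =>
    simp only [List.foldl_cons, List.map_cons, List.filter_cons]
    by_cases hx : pvClean x = ""
    · rw [if_pos (Or.inl hx), ih s]
      simp [hx]
    · by_cases hc : s.contains (pvClean x) = true
      · have hm : pvClean x ∈ s := (PySem.Set.contains_iff s (pvClean x)).mp hc
        rw [if_pos (Or.inr hc), ih s]
        have hadd : PySem.Set.add s (pvClean x) = s := by simp [PySem.Set.add, hm]
        simp [hx, PySem.Set.update_cons, hadd]
      · have hm : pvClean x ∉ s := fun h => hc ((PySem.Set.contains_iff s (pvClean x)).mpr h)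
        have hadd : PySem.Set.add s (pvClean x) = s ++ [pvClean x] := by
          simp [PySem.Set.add, hm]
        rw [if_neg (by simp [hx, hm]), hadd, ih (s ++ [pvClean x])]
        simp [hx, PySem.Set.update_cons, hadd]

theorem normalize_eq_dedup (values : List String) :
    normalize_csv values = PySem.List.dedup ((values.map pvClean).filter (fun v => !(v == ""))) := by
  unfold normalize_csv
  rw [show (PySem.Set.empty : PySem.Set String) = ([] : List String) from rfl]
  rw [normalize_loop values []]
  rw [PySem.Set.update_nil_left, PySem.List.dedup_eq_ofList]

theorem unknown_nil (values allowed : List String)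
    (h : ∀ x ∈ values, pvClean x = "" ∨ pvClean x ∈ allowed) :
    (PySem.List.dedup ((values.map pvClean).filter (fun v => !(v == "")))).filter
      (fun v => !(allowed.contains v)) = [] := by
  rw [List.filter_eq_nil_iff]
  intro v hv
  rw [PySem.List.mem_dedup] at hv
  simp only [List.mem_filter, List.mem_map] at hv
  obtain ⟨⟨x, hx, rfl⟩, hne⟩ := hv
  rcases h x hx with he | hm
  · simp [he] at hne
  · simp [hm]

-- A's selected list contains a non-empty name iff it appears among the cleaned entries
theorem contains_selected (vs : List String) (w : String) (hw : w ≠ "") :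
    (PySem.List.dedup ((vs.map pvClean).filter (fun v => !(v == "")))).contains w
      = appears vs w := by
  rw [Bool.eq_iff_iff]
  simp only [List.contains_iff_mem, PySem.List.mem_dedup, List.mem_filter, List.mem_map,
    appears, List.any_eq_true, beq_iff_eq]
  constructor
  · rintro ⟨⟨x, hx, rfl⟩, _⟩; exact ⟨x, hx, rfl⟩
  · rintro ⟨x, hx, rfl⟩; exact ⟨⟨x, hx, rfl⟩, by simp [hw]⟩

-- B's loop in terms of its pure mask value (the unknown list stays empty under Pre_)
theorem mask_loop (order values : List String) (m : Nat) (u : List String)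
    (h : ∀ x ∈ values, pvClean x = "" ∨ pvClean x ∈ order) :
    values.foldl (pvMaskStep order) (m, u) = (m ||| pvPure order values, u) := by
  induction values generalizing m with
  | nil => simp [pvPure]
  | cons x xs ih =>
    have hx := h x (by simp)
    have hxs : ∀ y ∈ xs, pvClean y = "" ∨ pvClean y ∈ order :=
      fun y hy => h y (by simp [hy])
    simp only [List.foldl_cons, pvMaskStep, pvPure]
    by_cases he : pvClean x = ""
    · rw [if_pos he, ih m hxs]
      simp [he]
    · rcases hx with hx | hx
      · exact absurd hx he
      · rcases hi : PySem.List.index? order (pvClean x) with _ | i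
        · rw [PySem.List.index?_eq_none_iff] at hi
          exact absurd hx hi
        · rw [if_neg he]
          rw [ih (m ||| 1 <<< i) hxs]
          simp [he, Nat.or_assoc]

theorem mask_eq (order values : List String)
    (h : ∀ x ∈ values, pvClean x = "" ∨ pvClean x ∈ order) :
    pvMask values order = some (pvPure order values) := by
  unfold pvMask
  rw [mask_loop order values 0 [] h]
  simp

-- bit i of the pure mask = 'order[i] appears among the cleaned entries'
theorem shift_one_testBit (k i : Nat) : ((1 <<< k).testBit i) = decide (i = k) := by
  rw [Nat.testBit_shiftLeft]
  by_cases h : k ≤ i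
  · have h1 : Nat.testBit 1 (i - k) = decide (i - k = 0) := by
      cases hik : i - k with
      | zero => decide
      | succ n => simp [Nat.testBit_succ]
    simp only [h, decide_true, Bool.true_and, h1]
    simp; omega
  · have hne : ¬ (i = k) := by omega
    simp [h, hne]

theorem pvPure_testBit (order values : List String) (hnd : order.Nodup)
    (i : Nat) (hi : i < order.length) (hne : order[i] ≠ "") :
    (pvPure order values).testBit i = appears values order[i] := by
  induction values with
  | nil => simp [pvPure, appears]
  | cons x xs ih =>
    have hhead : ((if pvClean x = "" then 0 else
        match PySem.List.index? order (pvClean x) with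
        | some k => 1 <<< k
        | none => 0) : Nat).testBit i = (pvClean x == order[i]) := by
      by_cases he : pvClean x = ""
      · simp [he, Ne.symm hne]
      · rcases hk : PySem.List.index? order (pvClean x) with _ | k
        · rw [PySem.List.index?_eq_none_iff] at hk
          have : pvClean x ≠ order[i] := fun hcontr => hk (hcontr ▸ List.getElem_mem hi)
          simp [he, this]
        · obtain ⟨hklt, hkv, -⟩ := PySem.List.getElem_of_index?_eq_some hk
          rw [if_neg he]
          simp only [shift_one_testBit]
          rw [Bool.eq_iff_iff]
          simp only [decide_eq_true_iff, beq_iff_eq]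
          constructor
          · rintro rfl; exact hkv.symm
          · intro hv
            have : order[i] = order[k] := by rw [← hv, hkv]
            exact (List.Nodup.getElem_inj_iff hnd).mp this
    simp only [pvPure, Nat.testBit_or, hhead, ih]
    simp [appears]
    
-- ===== VERDICT (by name: the statement is the Claim_ definition above) =====
theorem build_test_matrix_spec : Claim_equal_build_test_matrix := by
  intro workloads runtimes _ hpre
  obtain ⟨hw, hr⟩ := hpre
  unfold Spec_build_test_matrix build_test_matrix build_test_matrix_alt
  rw [mask_eq _ _ hw, mask_eq _ _ hr]
  simp only [normalize_eq_dedup, unknown_nil _ _ hw, unknown_nil _ _ hr,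
    ne_eq, not_true_eq_false, if_neg, not_false_iff]
  rw [List.filter_congr (l := WORKLOAD_ORDER) (fun x hx =>
        contains_selected workloads x (fun h => absurd (h ▸ hx) (by decide))),
      List.filter_congr (l := RUNTIME_ORDER) (fun x hx =>
        contains_selected runtimes x (fun h => absurd (h ▸ hx) (by decide)))]
  have HW0 : ((pvPure WORKLOAD_ORDER workloads >>> 0) &&& 1 ≠ 0) ↔ (appears workloads "word-stats" = true) := by
    rw [show ((pvPure WORKLOAD_ORDER workloads >>> 0) &&& 1 ≠ 0) ↔ (pvPure WORKLOAD_ORDER workloads).testBit 0 = true by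
          simp [Nat.testBit, Nat.and_comm]]
    rw [pvPure_testBit WORKLOAD_ORDER workloads (by decide) 0 (by decide) (by decide)]
    exact Iff.rfl
  have HW1 : ((pvPure WORKLOAD_ORDER workloads >>> 1) &&& 1 ≠ 0) ↔ (appears workloads "json-transform" = true) := by
    rw [show ((pvPure WORKLOAD_ORDER workloads >>> 1) &&& 1 ≠ 0) ↔ (pvPure WORKLOAD_ORDER workloads).testBit 1 = true by
          simp [Nat.testBit, Nat.and_comm]]
    rw [pvPure_testBit WORKLOAD_ORDER workloads (by decide) 1 (by decide) (by decide)]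
    exact Iff.rfl
  have HR0 : ((pvPure RUNTIME_ORDER runtimes >>> 0) &&& 1 ≠ 0) ↔ (appears runtimes "java" = true) := by
    rw [show ((pvPure RUNTIME_ORDER runtimes >>> 0) &&& 1 ≠ 0) ↔ (pvPure RUNTIME_ORDER runtimes).testBit 0 = true by
          simp [Nat.testBit, Nat.and_comm]]
    rw [pvPure_testBit RUNTIME_ORDER runtimes (by decide) 0 (by decide) (by decide)]
    exact Iff.rfl
  have HR1 : ((pvPure RUNTIME_ORDER runtimes >>> 1) &&& 1 ≠ 0) ↔ (appears runtimes "java-lite" = true) := by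
    rw [show ((pvPure RUNTIME_ORDER runtimes >>> 1) &&& 1 ≠ 0) ↔ (pvPure RUNTIME_ORDER runtimes).testBit 1 = true by
          simp [Nat.testBit, Nat.and_comm]]
    rw [pvPure_testBit RUNTIME_ORDER runtimes (by decide) 1 (by decide) (by decide)]
    exact Iff.rfl
  have HR2 : ((pvPure RUNTIME_ORDER runtimes >>> 2) &&& 1 ≠ 0) ↔ (appears runtimes "python" = true) := by
    rw [show ((pvPure RUNTIME_ORDER runtimes >>> 2) &&& 1 ≠ 0) ↔ (pvPure RUNTIME_ORDER runtimes).testBit 2 = true by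
          simp [Nat.testBit, Nat.and_comm]]
    rw [pvPure_testBit RUNTIME_ORDER runtimes (by decide) 2 (by decide) (by decide)]
    exact Iff.rfl
  have HR3 : ((pvPure RUNTIME_ORDER runtimes >>> 3) &&& 1 ≠ 0) ↔ (appears runtimes "exec" = true) := by
    rw [show ((pvPure RUNTIME_ORDER runtimes >>> 3) &&& 1 ≠ 0) ↔ (pvPure RUNTIME_ORDER runtimes).testBit 3 = true by
          simp [Nat.testBit, Nat.and_comm]]
    rw [pvPure_testBit RUNTIME_ORDER runtimes (by decide) 3 (by decide) (by decide)]
    exact Iff.rfl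
  simp only [show PySem.List.enumerate WORKLOAD_ORDER = [((0:Int),"word-stats"),(1,"json-transform")] from rfl,
    show PySem.List.enumerate RUNTIME_ORDER = [((0:Int),"java"),(1,"java-lite"),(2,"python"),(3,"exec")] from rfl,
    List.foldl_cons, List.foldl_nil]
  simp only [show ((0:Int)).toNat = 0 from rfl, show ((1:Int)).toNat = 1 from rfl,
    show ((2:Int)).toNat = 2 from rfl, show ((3:Int)).toNat = 3 from rfl]
  simp only [HW0, HW1, HR0, HR1, HR2, HR3]
  simp only [WORKLOAD_ORDER, RUNTIME_ORDER, List.filter_cons, List.filter_nil]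
  generalize appears workloads "word-stats" = b1
  generalize appears workloads "json-transform" = b2
  generalize appears runtimes "java" = c1
  generalize appears runtimes "java-lite" = c2
  generalize appears runtimes "python" = c3
  generalize appears runtimes "exec" = c4
  revert b1 b2 c1 c2 c3 c4
  decide
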